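-- pv_equiv track=rewrite | github.com/PRISBteam/Plastic-Slip-Simulator | NaimarkMH/cochain.py | subtract_dictionaries
-- ===== SOURCE A (Python) =====
-- def subtract_dictionaries(dict1: dict, dict2: dict) -> dict:
--     """
--     Merges two dictionaries. Where the dictionaries have the same keys,
--     the function subtracts the value in the second dictionary from the value
--     in the first dictionary in the resulting dictionary. Where the dictionaries
--     do not have the same keys, the function adds those keys and their
--     corresponding values to the resulting dictionary.
--
--     Parameters:
--     dict1 (dict): The first dictionary.
--     dict2 (dict): The second dictionary.
--
--     Returns:
--     dict: A dictionary resulting from the subtraction of dict2 from dict1.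
--     """
--     result = dict1.copy()  # Start with a copy of the first dictionary
--
--     for key, value in dict2.items():
--         if key in result:
--             result[key] -= value # Subtract the value if the key is in both dictionaries
--         else:
--             result[key] = -value # Add the key with its negative value if the key is only in the second dictionary
--
--     return result
-- ===== SOURCE B (Python) =====
-- def subtract_dictionaries(dict1: dict, dict2: dict) -> dict:
--     return {
--         k: (dict1[k] - dict2[k]) if (k in dict1 and k in dict2)
--            else (dict1[k] if k in dict1 else -dict2[k])
--         for k in {**dict1, **dict2}
--     }
-- ===== Notes on version B (the rewrite author's own statement) =====
-- stated objective: simpler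
-- what changed: Replaces A's copy-then-mutate strategy (copy dict1, then loop over dict2 updating/adding keys) with a single dict comprehension over the merged keyset {**dict1, **dict2}, branching per key on membership in dict1/dict2.
import Mathlib
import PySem

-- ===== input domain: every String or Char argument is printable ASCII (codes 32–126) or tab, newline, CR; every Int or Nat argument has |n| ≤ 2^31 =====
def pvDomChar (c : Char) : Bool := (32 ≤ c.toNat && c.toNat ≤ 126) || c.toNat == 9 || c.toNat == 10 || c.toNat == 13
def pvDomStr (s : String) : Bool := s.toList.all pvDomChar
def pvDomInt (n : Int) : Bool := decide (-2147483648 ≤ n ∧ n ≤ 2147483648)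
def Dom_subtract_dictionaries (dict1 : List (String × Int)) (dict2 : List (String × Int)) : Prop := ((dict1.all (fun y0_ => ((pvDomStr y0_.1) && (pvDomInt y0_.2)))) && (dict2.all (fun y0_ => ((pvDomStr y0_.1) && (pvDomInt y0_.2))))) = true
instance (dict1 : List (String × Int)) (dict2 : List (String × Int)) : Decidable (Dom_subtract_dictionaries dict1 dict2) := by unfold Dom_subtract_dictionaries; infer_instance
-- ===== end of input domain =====

-- B builds the result in one dict comprehension over the merged keyset instead of A's copy-then-mutate loop (objective: simpler); same cost.

-- ===== PORT A =====
-- result = dict1.copy(); for key, value in dict2.items(): if key in result: result[key] -= value else: result[key] = -value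
def subtract_dictionaries (dict1 : List (String × Int)) (dict2 : List (String × Int)) : List (String × Int) :=
  (dict2.foldl (fun res kv =>
      if res.contains kv.1 then res.insert kv.1 (res.getD kv.1 0 - kv.2)
      else res.insert kv.1 (-kv.2))
    (PySem.Dict.mk dict1)).items

-- ===== PORT B =====
-- {k: dict1[k]-dict2[k] if k in dict1 and k in dict2 else (dict1[k] if k in dict1 else -dict2[k]) for k in {**dict1, **dict2}}
def subtract_dictionaries_alt (dict1 : List (String × Int)) (dict2 : List (String × Int)) : List (String × Int) :=
  let D1 := PySem.Dict.mk dict1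
  let D2 := PySem.Dict.mk dict2
  (PySem.Dict.ofList (dict1 ++ dict2)).keys.map (fun k =>
    (k, if D1.contains k && D2.contains k then D1.getD k 0 - D2.getD k 0
        else if D1.contains k then D1.getD k 0 else -(D2.getD k 0)))

-- ===== PRECONDITION & SPEC =====
-- Pre_: the Python arguments are dicts, so the association lists encoding them have pairwise-distinct
-- keys; a list with a duplicated key encodes no Python input of this function and nothing is claimed there.
def Pre_subtract_dictionaries (dict1 : List (String × Int)) (dict2 : List (String × Int)) : Prop :=
  (dict1.map Prod.fst).Nodup ∧ (dict2.map Prod.fst).Nodup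
instance (dict1 : List (String × Int)) (dict2 : List (String × Int)) : Decidable (Pre_subtract_dictionaries dict1 dict2) := by unfold Pre_subtract_dictionaries; infer_instance

def pvWitness_subtract_dictionaries : (List (String × Int)) × (List (String × Int)) :=
  ([("a", 3), ("b", 5)], [("a", 1), ("c", 2)])

def Spec_subtract_dictionaries (dict1 : List (String × Int)) (dict2 : List (String × Int)) (out : List (String × Int)) : Prop := out = subtract_dictionaries_alt dict1 dict2
instance (dict1 : List (String × Int)) (dict2 : List (String × Int)) (out : List (String × Int)) : Decidable (Spec_subtract_dictionaries dict1 dict2 out) := by unfold Spec_subtract_dictionaries; infer_instance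

-- ===== CLAIM (what is proved, stated in full; the proofs are below) =====
def Claim_equal_subtract_dictionaries : Prop := ∀ (dict1 : List (String × Int)) (dict2 : List (String × Int)), Dom_subtract_dictionaries dict1 dict2 → Pre_subtract_dictionaries dict1 dict2 → Spec_subtract_dictionaries dict1 dict2 (subtract_dictionaries dict1 dict2)

-- ===== LEMMAS AND PROOFS =====

-- the per-entry effect of A's loop on an entry of dict1 (proof-only helper)
def pvG (d2 : List (String × Int)) (p : String × Int) : String × Int :=
  if (PySem.Dict.mk d2).contains p.1 then (p.1, p.2 - (PySem.Dict.mk d2).getD p.1 0) else p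

lemma A_loop (d2 : List (String × Int)) (d : PySem.Dict String Int)
    (hd : d.keys.Nodup) (h2 : (d2.map Prod.fst).Nodup) :
    (d2.foldl (fun res kv =>
        if res.contains kv.1 then res.insert kv.1 (res.getD kv.1 0 - kv.2)
        else res.insert kv.1 (-kv.2)) d).items
      = d.items.map (pvG d2)
        ++ (d2.filter (fun p => !d.contains p.1)).map (fun p => (p.1, -p.2)) := by
  induction d2 generalizing d with
  | nil =>
      have hid : d.items.map (pvG []) = d.items.map id :=
        List.map_congr_left (fun p _ => by simp [pvG, PySem.Dict.contains_mk])
      simp [hid]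
  | cons kv t ih =>
      simp only [List.map_cons, List.nodup_cons, List.mem_map] at h2
      obtain ⟨hkt, h2t⟩ := h2
      simp only [List.foldl_cons]
      by_cases hc : d.contains kv.1 = true
      · rw [if_pos hc]
        rw [ih _ (by rw [PySem.Dict.keys_insert_of_contains _ _ hc]; exact hd) h2t]
        rw [PySem.Dict.items_insert_of_contains _ _ hc, List.map_map]
        have hnt : (PySem.Dict.mk t).contains kv.1 = false := by
          rw [PySem.Dict.contains_mk]
          simp only [List.any_eq_false]
          intro q hq
          simp only [beq_iff_eq]
          exact fun h => hkt ⟨q, hq, h⟩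
        congr 1
        · apply List.map_congr_left
          intro p hp
          by_cases hpk : p.1 = kv.1
          · have hv : d.getD kv.1 0 = p.2 := by
              have : (p.1, p.2) ∈ d.items := by simpa using hp
              rw [← hpk]; exact PySem.Dict.getD_of_mem_items d this hd 0
            have hbeq : (p.1 == kv.1) = true := by simpa using hpk
            simp only [Function.comp_apply, hbeq, if_true]
            rw [hv]
            simp [pvG, hnt, PySem.Dict.getD, PySem.Dict.get?_mk_cons kv.1 kv.2 t, hpk]
          · have hbeq : (p.1 == kv.1) = false := by simpa using hpk
            have hkp : (kv.1 == p.1) = false := by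
              simpa using fun h => hpk h.symm
            simp only [Function.comp_apply, hbeq, Bool.false_eq_true, if_false]
            simp [pvG, PySem.Dict.contains_mk, PySem.Dict.getD, PySem.Dict.get?_mk_cons kv.1 kv.2 t, hkp]
            simp only [hkp, Bool.false_or]
            by_cases ht : (t.any fun q => q.1 == p.1) = true <;> simp [ht]
        · rw [List.filter_cons_of_neg (by simp [hc])]
          apply congrArg
          apply List.filter_congr
          intro p hp
          have hpk : (p.1 == kv.1) = false := by
            simp only [beq_eq_false_iff_ne, ne_eq]
            exact fun h => hkt ⟨p, hp, h⟩
          rw [PySem.Dict.contains_insert, hpk]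
          simp
      · rw [if_neg hc]
        have hc' : d.contains kv.1 = false := by simpa using hc
        rw [ih _ (PySem.Dict.nodup_keys_insert _ _ _ hd) h2t]
        rw [PySem.Dict.items_insert_of_not_contains _ _ hc']
        rw [List.map_append]
        have hnt : (PySem.Dict.mk t).contains kv.1 = false := by
          rw [PySem.Dict.contains_mk]
          simp only [List.any_eq_false]
          intro q hq
          simp only [beq_iff_eq]
          exact fun h => hkt ⟨q, hq, h⟩
        have hfil : (t.filter fun p => !(d.insert kv.1 (-kv.2)).contains p.1)
            = t.filter fun p => !d.contains p.1 := by
          apply List.filter_congr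
          intro p hp
          have hpk : (p.1 == kv.1) = false := by
            simp only [beq_eq_false_iff_ne, ne_eq]
            exact fun h => hkt ⟨p, hp, h⟩
          rw [PySem.Dict.contains_insert, hpk]
          simp
        have hmapg : (d.items.map (pvG t)) = d.items.map (pvG (kv :: t)) := by
          apply List.map_congr_left
          intro p hp
          have hpk : ¬ p.1 = kv.1 := by
            intro h
            have hct : d.contains kv.1 = true := by
              simp only [PySem.Dict.contains]
              exact List.any_eq_true.2 ⟨p, hp, by simp [h]⟩
            rw [hc'] at hct
            exact absurd hct (by simp)
          have hkp : (kv.1 == p.1) = false := by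
            simpa using fun h => hpk h.symm
          simp [pvG, PySem.Dict.contains_mk, PySem.Dict.getD, PySem.Dict.get?_mk_cons kv.1 kv.2 t, hkp]
          simp only [hkp, Bool.false_or]
          by_cases ht : (t.any fun q => q.1 == p.1) = true <;> simp [ht]
        rw [hmapg, hfil]
        rw [List.filter_cons_of_pos (by simp [hc'])]
        simp only [List.map_cons, List.map_nil]
        have hgkv : pvG t (kv.1, -kv.2) = (kv.1, -kv.2) := by
          simp [pvG, hnt]
        rw [hgkv]
        simp

lemma update_append_fresh (l : List (String × Int)) (d : PySem.Dict String Int)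
    (hdisj : ∀ p ∈ l, d.contains p.1 = false) (hl : (l.map Prod.fst).Nodup) :
    (d.update l).items = d.items ++ l := by
  induction l generalizing d with
  | nil => simp [PySem.Dict.update]
  | cons kv t ih =>
      simp only [List.map_cons, List.nodup_cons, List.mem_map] at hl
      obtain ⟨hkt, hlt⟩ := hl
      have hc : d.contains kv.1 = false := hdisj kv (by simp)
      have : (d.update (kv :: t)) = ((d.insert kv.1 kv.2).update t) := by
        simp [PySem.Dict.update]
      rw [this, ih]
      · rw [PySem.Dict.items_insert_of_not_contains _ _ hc]; simp
      · intro p hp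
        rw [PySem.Dict.contains_insert]
        have hpk : (p.1 == kv.1) = false := by
          simp only [beq_eq_false_iff_ne, ne_eq]
          exact fun h => hkt ⟨p, hp, h⟩
        rw [hpk, hdisj p (by simp [hp])]
        simp
      · exact hlt

lemma keys_update_nodup (l : List (String × Int)) (d : PySem.Dict String Int)
    (hl : (l.map Prod.fst).Nodup) :
    (d.update l).keys = d.keys ++ (l.filter (fun p => !d.contains p.1)).map Prod.fst := by
  induction l generalizing d with
  | nil => simp [PySem.Dict.update]
  | cons kv t ih =>
      simp only [List.map_cons, List.nodup_cons, List.mem_map] at hl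
      obtain ⟨hkt, hlt⟩ := hl
      have hstep : (d.update (kv :: t)) = ((d.insert kv.1 kv.2).update t) := by
        simp [PySem.Dict.update]
      rw [hstep, ih _ hlt]
      by_cases hc : d.contains kv.1 = true
      · rw [PySem.Dict.keys_insert_of_contains _ _ hc]
        rw [List.filter_cons_of_neg (by simp [hc])]
        apply congrArg
        apply congrArg
        apply List.filter_congr
        intro p hp
        have hpk : (p.1 == kv.1) = false := by
          simp only [beq_eq_false_iff_ne, ne_eq]
          exact fun h => hkt ⟨p, hp, h⟩
        rw [PySem.Dict.contains_insert, hpk]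
        simp
      · have hc' : d.contains kv.1 = false := by simpa using hc
        rw [PySem.Dict.keys_insert_of_not_contains _ _ hc']
        rw [List.filter_cons_of_pos (by simp [hc'])]
        have hfil : (t.filter fun p => !(d.insert kv.1 kv.2).contains p.1)
            = t.filter fun p => !d.contains p.1 := by
          apply List.filter_congr
          intro p hp
          have hpk : (p.1 == kv.1) = false := by
            simp only [beq_eq_false_iff_ne, ne_eq]
            exact fun h => hkt ⟨p, hp, h⟩
          rw [PySem.Dict.contains_insert, hpk]
          simp
        rw [hfil]
        simp

-- ===== VERDICT (by name: the statement is the Claim_ definition above) =====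
theorem subtract_dictionaries_spec : Claim_equal_subtract_dictionaries := by
  intro d1 d2 _ hpre
  obtain ⟨h1, h2⟩ := hpre
  unfold Spec_subtract_dictionaries subtract_dictionaries subtract_dictionaries_alt
  have hd1 : (PySem.Dict.mk d1).keys.Nodup := by
    simpa [PySem.Dict.keys_mk] using h1
  rw [A_loop d2 (PySem.Dict.mk d1) hd1 h2]
  -- B side: compute the merged keyset
  have hof : (PySem.Dict.ofList (d1 ++ d2)).keys
      = d1.map Prod.fst ++ (d2.filter (fun p => !(PySem.Dict.mk d1).contains p.1)).map Prod.fst := by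
    have : PySem.Dict.ofList (d1 ++ d2) = (PySem.Dict.empty.update d1).update d2 := by
      simp [PySem.Dict.ofList, PySem.Dict.update]
    rw [this]
    have hmk : PySem.Dict.empty.update d1 = PySem.Dict.mk d1 := by
      apply PySem.Dict.ext
      rw [update_append_fresh d1 PySem.Dict.empty (fun p _ => by simp) h1]
      simp [PySem.Dict.empty]
    rw [hmk, keys_update_nodup d2 _ h2, PySem.Dict.keys_mk]
  rw [hof, List.map_append, List.map_map, List.map_map]
  congr 1
  · apply List.map_congr_left
    intro p hp
    have hc1 : (PySem.Dict.mk d1).contains p.1 = true := by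
      rw [PySem.Dict.contains_mk]
      exact List.any_eq_true.2 ⟨p, hp, by simp⟩
    have hv1 : (PySem.Dict.mk d1).getD p.1 0 = p.2 := by
      have : (p.1, p.2) ∈ (PySem.Dict.mk d1).items := by simpa using hp
      exact PySem.Dict.getD_of_mem_items _ this (by simpa [PySem.Dict.keys_mk] using h1) 0
    by_cases hc2 : (PySem.Dict.mk d2).contains p.1 = true
    · simp only [Function.comp_apply, pvG, hc1, hc2, hv1, Bool.and_self, if_true]
    · have hc2' : (PySem.Dict.mk d2).contains p.1 = false := by
        revert hc2; cases ((PySem.Dict.mk d2).contains p.1) <;> simp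
      simp only [Function.comp_apply, pvG, hc1, hc2', hv1, Bool.and_false, Bool.false_eq_true, if_false, if_true]
  · apply List.map_congr_left
    intro p hp
    have hpd2 : p ∈ d2 := List.mem_of_mem_filter hp
    have hc1 : (PySem.Dict.mk d1).contains p.1 = false := by
      have h := List.of_mem_filter hp
      simp only [Bool.not_eq_eq_eq_not] at h
      exact h
    have hv2 : (PySem.Dict.mk d2).getD p.1 0 = p.2 := by
      have : (p.1, p.2) ∈ (PySem.Dict.mk d2).items := by simpa using hpd2
      exact PySem.Dict.getD_of_mem_items _ this (by simpa [PySem.Dict.keys_mk] using h2) 0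
    simp only [Function.comp_apply, hc1, hv2, Bool.false_and, Bool.false_eq_true, if_false]
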